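-- pv_equiv track=rewrite | github.com/parkminh0/Programmers | Lv. 0/로그인 성공물음표.py | solution
-- ===== SOURCE A (Python) =====
-- def solution(id_pw, db):
--     result = 'fail'
--     for i in db:
--         if i[0] == id_pw[0]:
--             if i[1] != id_pw[1]:
--                 result = 'wrong pw'
--             else:
--                 result = 'login'
--     return result
-- ===== SOURCE B (Python) =====
-- def solution(id_pw, db):
--     for i in reversed(db):
--         if i[0] == id_pw[0]:
--             return 'login' if i[1] == id_pw[1] else 'wrong pw'
--     return 'fail'
-- ===== Notes on version B (the rewrite author's own statement) =====
-- stated objective: simpler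
-- what changed: Replaces A's full forward scan that keeps overwriting a result variable (last match wins) by a reversed scan that returns at the first matching id, eliminating the mutable accumulator.
import Mathlib
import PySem

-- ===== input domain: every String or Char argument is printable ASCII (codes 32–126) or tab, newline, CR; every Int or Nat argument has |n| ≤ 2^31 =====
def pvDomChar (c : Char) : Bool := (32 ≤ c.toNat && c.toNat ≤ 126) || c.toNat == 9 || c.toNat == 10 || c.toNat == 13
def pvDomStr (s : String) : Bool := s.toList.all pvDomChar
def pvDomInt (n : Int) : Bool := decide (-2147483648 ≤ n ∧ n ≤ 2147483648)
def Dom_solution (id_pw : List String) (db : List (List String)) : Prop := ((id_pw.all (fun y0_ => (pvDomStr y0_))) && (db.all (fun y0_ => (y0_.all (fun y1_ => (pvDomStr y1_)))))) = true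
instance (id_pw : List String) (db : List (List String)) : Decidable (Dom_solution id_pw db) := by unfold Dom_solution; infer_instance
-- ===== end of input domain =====

-- B replaces A's full forward scan with an overwritten result variable by a reversed scan that
-- returns at the first matching id (first match in reverse = A's last-match-wins); objective: simpler.

-- ===== PORT A =====
def solution (id_pw : List String) (db : List (List String)) : String :=
  db.foldl (fun result i =>
    if PySem.List.pyGet? i 0 = PySem.List.pyGet? id_pw 0 then
      (if PySem.List.pyGet? i 1 ≠ PySem.List.pyGet? id_pw 1 then "wrong pw" else "login")
    else result) "fail"

-- ===== PORT B =====
-- the 'for i in reversed(db): … return …' loop of Source B, as recursion on db.reverse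
def solutionAltGo (k t : Option String) : List (List String) → String
  | [] => "fail"
  | i :: rest =>
      if PySem.List.pyGet? i 0 = k then
        (if PySem.List.pyGet? i 1 = t then "login" else "wrong pw")
      else solutionAltGo k t rest

def solution_alt (id_pw : List String) (db : List (List String)) : String :=
  solutionAltGo (PySem.List.pyGet? id_pw 0) (PySem.List.pyGet? id_pw 1) db.reverse

-- ===== PRECONDITION & SPEC =====
-- Pre_ is exactly where Python A returns normally: every row has its id field, id_pw[0] exists
-- when it is ever read (db nonempty), and whenever a row's id matches, both passwords exist.
def Pre_solution (id_pw : List String) (db : List (List String)) : Prop :=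
  (db ≠ [] → id_pw ≠ []) ∧
  ∀ row ∈ db, row ≠ [] ∧
    (PySem.List.pyGet? row 0 = PySem.List.pyGet? id_pw 0 → 2 ≤ row.length ∧ 2 ≤ id_pw.length)
instance (id_pw : List String) (db : List (List String)) : Decidable (Pre_solution id_pw db) := by unfold Pre_solution; infer_instance
def pvWitness_solution : List String × List (List String) := (["a", "b"], [["a", "b"], ["c", "d"]])

def Spec_solution (id_pw : List String) (db : List (List String)) (out : String) : Prop := out = solution_alt id_pw db
instance (id_pw : List String) (db : List (List String)) (out : String) : Decidable (Spec_solution id_pw db out) := by unfold Spec_solution; infer_instance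

-- ===== CLAIM (what is proved, stated in full; the proofs are below) =====
def Claim_equal_solution : Prop := ∀ (id_pw : List String) (db : List (List String)), Dom_solution id_pw db → Pre_solution id_pw db → Spec_solution id_pw db (solution id_pw db)

-- ===== LEMMAS AND PROOFS =====

-- proof helper: B's reversed scan, generalised over the value returned when no row matches
def pvScan (k t : Option String) (l : List (List String)) (r : String) : String :=
  match l with
  | [] => r
  | i :: rest =>
      if PySem.List.pyGet? i 0 = k then
        (if PySem.List.pyGet? i 1 = t then "login" else "wrong pw")
      else pvScan k t rest r

theorem pvScan_append (k t : Option String) (l1 l2 : List (List String)) (r : String) :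
    pvScan k t (l1 ++ l2) r = pvScan k t l1 (pvScan k t l2 r) := by
  induction l1 with
  | nil => rfl
  | cons i rest ih => by_cases h : PySem.List.pyGet? i 0 = k <;> simp [pvScan, h, ih]

theorem solutionAltGo_eq_pvScan (k t : Option String) (l : List (List String)) :
    solutionAltGo k t l = pvScan k t l "fail" := by
  induction l with
  | nil => rfl
  | cons i rest ih => by_cases h : PySem.List.pyGet? i 0 = k <;> simp [pvScan, solutionAltGo, h, ih]

-- loop correspondence: A's forward overwrite fold equals B's scan of the reversed list
theorem pv_loop (k t : Option String) (db : List (List String)) :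
    ∀ res : String,
      db.foldl (fun result i =>
          if PySem.List.pyGet? i 0 = k then
            (if PySem.List.pyGet? i 1 ≠ t then "wrong pw" else "login")
          else result) res
        = pvScan k t db.reverse res := by
  induction db with
  | nil => intro res; rfl
  | cons row rest ih =>
      intro res
      rw [List.foldl_cons, ih, List.reverse_cons, pvScan_append]
      by_cases h : PySem.List.pyGet? row 0 = k
      · by_cases ht : PySem.List.pyGet? row 1 = t <;> simp [pvScan, h, ht]
      · simp [pvScan, h]

-- ===== VERDICT (by name: the statement is the Claim_ definition above) =====
theorem solution_spec : Claim_equal_solution := by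
  intro id_pw db _ _
  unfold Spec_solution solution solution_alt
  rw [pv_loop, solutionAltGo_eq_pvScan]
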